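-- pv_equiv track=rewrite | github.com/1anKoz/ObliczeniaInteligentne | proj2_tsk1/MINST encoding.py | width_measurements
-- ===== SOURCE A (Python) =====
-- def width_measurements(data):
--     vectors = []
--     for row in data:
--         measureBlack = False
--         separated = False
--         val = 0
--         if not row[0] == 0:
--             measureBlack = True
--
--         for el in row:
--             if not el == 0:
--                 if measureBlack:
--                     val += 1
--                 else:
--                     if val > 0:
--                         separated = True
--                     measureBlack = True
--                     val += 1
--             else:
--                 measureBlack = False
--
--         if separated:
--             val *= -1
--         vectors.append(val)
--     return vectors
-- ===== SOURCE B (Python) =====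
-- def width_measurements(data):
--     return [_row_value(row) for row in data]
--
--
-- def _row_value(row):
--     count = sum(1 for el in row if el != 0)
--     runs = sum(1 for prev, cur in zip([0] + row, row) if prev == 0 and cur != 0)
--     return -count if runs >= 2 else count
-- ===== Notes on version B (the rewrite author's own statement) =====
-- stated objective: simpler
-- what changed: Replaces A's one-pass state machine (measureBlack/separated flags mutated while scanning) by two stateless counts per row: the number of non-zero pixels and the number of run starts (zip with the shifted row), negating the count when there are at least two runs.
import Mathlib
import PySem

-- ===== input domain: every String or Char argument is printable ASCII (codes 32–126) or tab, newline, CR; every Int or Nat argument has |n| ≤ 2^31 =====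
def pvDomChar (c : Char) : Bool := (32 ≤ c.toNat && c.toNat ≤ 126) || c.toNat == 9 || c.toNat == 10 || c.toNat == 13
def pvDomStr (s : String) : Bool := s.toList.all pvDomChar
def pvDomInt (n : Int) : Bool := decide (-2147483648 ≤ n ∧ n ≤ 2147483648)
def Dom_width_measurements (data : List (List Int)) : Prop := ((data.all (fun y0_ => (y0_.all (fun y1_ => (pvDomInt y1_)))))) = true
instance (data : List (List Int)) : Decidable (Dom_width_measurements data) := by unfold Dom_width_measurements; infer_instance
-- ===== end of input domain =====

-- B replaces A's one-pass flag state machine by two stateless per-row counts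
-- (non-zero pixels, and run starts via a shifted zip); same cost, simpler.
-- On an empty row Python A raises IndexError (row[0]); excluded by Pre_.

-- ===== PORT A =====
-- inner loop body: state = (measureBlack, separated, val)
def wmStep (st : Bool × Bool × Int) (el : Int) : Bool × Bool × Int :=
  if el ≠ 0 then
    if st.1 then (st.1, st.2.1, st.2.2 + 1)
    else (true, (if st.2.2 > 0 then true else st.2.1), st.2.2 + 1)
  else (false, st.2.1, st.2.2)

-- one row of A's outer loop; the [] case is where Python raises IndexError (outside Pre_)
def wmRow (row : List Int) : Int :=
  match row with
  | [] => 0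
  | h :: _ =>
    let measureBlack : Bool := if h ≠ 0 then true else false
    let st := row.foldl wmStep (measureBlack, false, 0)
    if st.2.1 then st.2.2 * (-1) else st.2.2

def width_measurements (data : List (List Int)) : List Int :=
  data.foldl (fun vectors row => vectors ++ [wmRow row]) []

-- ===== PORT B =====
def nzCount (row : List Int) : Int :=
  row.foldl (fun acc el => if el ≠ 0 then acc + 1 else acc) 0

def nzRuns (row : List Int) : Int :=
  (List.zip (0 :: row) row).foldl
    (fun acc p => if p.1 = 0 ∧ p.2 ≠ 0 then acc + 1 else acc) 0

def rowValue (row : List Int) : Int :=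
  if nzRuns row ≥ 2 then -(nzCount row) else nzCount row

def width_measurements_alt (data : List (List Int)) : List Int :=
  data.map rowValue

-- ===== PRECONDITION & SPEC =====
-- Pre_ excludes inputs containing an empty row: there Python A raises IndexError (row[0]).
def Pre_width_measurements (data : List (List Int)) : Prop :=
  ∀ row ∈ data, row ≠ []

instance (data : List (List Int)) : Decidable (Pre_width_measurements data) := by
  unfold Pre_width_measurements; infer_instance

def pvWitness_width_measurements : List (List Int) := [[0, 3, 0, 2], [1, 1]]

def Spec_width_measurements (data : List (List Int)) (out : List Int) : Prop :=
  out = width_measurements_alt data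

instance (data : List (List Int)) (out : List Int) : Decidable (Spec_width_measurements data out) := by
  unfold Spec_width_measurements; infer_instance

-- ===== CLAIM (what is proved, stated in full; the proofs are below) =====
def Claim_equal_width_measurements : Prop := ∀ (data : List (List Int)), Dom_width_measurements data → Pre_width_measurements data → Spec_width_measurements data (width_measurements data)

-- ===== LEMMAS AND PROOFS =====

-- proof-side recursive counts
def cntR : List Int → Int
  | [] => 0
  | a :: t => (if a ≠ 0 then 1 else 0) + cntR t

def startR : Int → List Int → Int
  | _, [] => 0
  | p, a :: t => (if p = 0 ∧ a ≠ 0 then 1 else 0) + startR a t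

def hasStart : Bool → List Int → Bool
  | _, [] => false
  | mb, a :: t => if a ≠ 0 then (if mb then hasStart true t else true) else hasStart false t

theorem startR_nonneg (p : Int) (l : List Int) : 0 ≤ startR p l := by
  induction l generalizing p with
  | nil => simp [startR]
  | cons a t ih => simp only [startR]; have := ih a; split <;> omega

theorem nzCount_eq_aux (l : List Int) (acc : Int) :
    l.foldl (fun acc el => if el ≠ 0 then acc + 1 else acc) acc = acc + cntR l := by
  induction l generalizing acc with
  | nil => simp [cntR]
  | cons a t ih => simp only [List.foldl, cntR, ih]; split <;> omega

theorem nzCount_eq (l : List Int) : nzCount l = cntR l := by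
  simpa [nzCount] using nzCount_eq_aux l 0

theorem nzRuns_eq_aux (l : List Int) (p acc : Int) :
    (List.zip (p :: l) l).foldl
      (fun acc q => if q.1 = 0 ∧ q.2 ≠ 0 then acc + 1 else acc) acc = acc + startR p l := by
  induction l generalizing p acc with
  | nil => simp [startR]
  | cons a t ih => simp only [List.zip_cons_cons, List.foldl, startR, ih]; split <;> omega

theorem nzRuns_eq (l : List Int) : nzRuns l = startR 0 l := by
  simpa [nzRuns] using nzRuns_eq_aux l 0 0

theorem hasStart_eq (t : List Int) (p : Int) :
    hasStart (decide (p ≠ 0)) t = decide (0 < startR p t) := by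
  induction t generalizing p with
  | nil => simp [hasStart, startR]
  | cons a s ih =>
    by_cases ha : a = 0
    · subst ha
      simp only [hasStart, startR]
      have := ih 0
      simp_all
    · by_cases hp : p = 0
      · subst hp
        have := startR_nonneg a s
        simp only [hasStart, startR]
        simp_all
        omega
      · simp only [hasStart, startR]
        have := ih a
        simp_all

-- A's inner fold once val has become positive
theorem foldA_pos (l : List Int) (mb sep : Bool) (v : Int) (hv : 0 < v) :
    (l.foldl wmStep (mb, sep, v)).2 = (sep || hasStart mb l, v + cntR l) := by
  induction l generalizing mb sep v with
  | nil => simp [hasStart, cntR]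
  | cons a t ih =>
    by_cases ha : a = 0
    · subst ha
      simp only [List.foldl, wmStep, hasStart, cntR]
      simp [ih false sep v hv]
    · cases mb with
      | true =>
        simp only [List.foldl, wmStep, hasStart, cntR]
        have := ih true sep (v + 1) (by omega)
        simp_all
        omega
      | false =>
        simp only [List.foldl, wmStep, hasStart, cntR]
        have := ih true true (v + 1) (by omega)
        simp_all
        omega

-- A's inner fold from the leading-zeros phase
theorem foldA_zero (l : List Int) :
    (l.foldl wmStep (false, false, 0)).2 = (decide (2 ≤ startR 0 l), cntR l) := by
  induction l with
  | nil => simp [startR, cntR]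
  | cons a t ih =>
    by_cases ha : a = 0
    · subst ha
      simp only [List.foldl, wmStep, startR]
      simpa [cntR] using ih
    · simp only [List.foldl, wmStep, startR]
      have h1 := foldA_pos t true false 1 (by omega)
      have h2 := hasStart_eq t a
      have h3 := startR_nonneg a t
      simp_all [cntR]
      constructor <;> omega

theorem row_eq (row : List Int) (hrow : row ≠ []) : wmRow row = rowValue row := by
  match row with
  | [] => exact absurd rfl hrow
  | h :: t =>
    have hcnt : nzCount (h :: t) = (if h ≠ 0 then 1 else 0) + cntR t := by
      simp [nzCount_eq, cntR]
    have hruns : nzRuns (h :: t) = (if h ≠ 0 then 1 else 0) + startR h t := by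
      simp [nzRuns_eq, startR]
    by_cases hh : h = 0
    · subst hh
      have hstate : (0 :: t).foldl wmStep ((if (0 : Int) ≠ 0 then true else false), false, 0)
          = t.foldl wmStep (false, false, 0) := by
        norm_num [List.foldl, wmStep]
      have h1 : (t.foldl wmStep (false, false, 0)).2.1 = decide (2 ≤ startR 0 t) := by
        rw [foldA_zero]
      have h2 : (t.foldl wmStep (false, false, 0)).2.2 = cntR t := by
        rw [foldA_zero]
      simp only [wmRow]
      rw [hstate, h1, h2, rowValue, hcnt, hruns]
      simp only [ge_iff_le, decide_eq_true_eq]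
      split_ifs <;> first | rfl | omega
    · have hstate : (h :: t).foldl wmStep ((if h ≠ 0 then true else false), false, 0)
          = t.foldl wmStep (true, false, 1) := by
        simp [List.foldl, wmStep, hh]
      have hhs : hasStart true t = decide (0 < startR h t) := by
        simpa [hh] using hasStart_eq t h
      have hA := foldA_pos t true false 1 one_pos
      have h1 : (t.foldl wmStep (true, false, 1)).2.1 = decide (0 < startR h t) := by
        rw [hA]; simp [hhs]
      have h2 : (t.foldl wmStep (true, false, 1)).2.2 = 1 + cntR t := by
        rw [hA]
      simp only [wmRow]
      rw [hstate, h1, h2, rowValue, hcnt, hruns]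
      simp only [ge_iff_le, decide_eq_true_eq]
      split_ifs <;> first | rfl | omega

theorem outer_fold (data : List (List Int)) (acc : List Int) :
    data.foldl (fun vectors row => vectors ++ [wmRow row]) acc = acc ++ data.map wmRow := by
  induction data generalizing acc with
  | nil => simp
  | cons r rs ih => simp [List.foldl, ih]

-- ===== VERDICT (by name: the statement is the Claim_ definition above) =====
theorem width_measurements_spec : Claim_equal_width_measurements := by
  intro data _ hpre
  unfold Spec_width_measurements width_measurements width_measurements_alt
  rw [outer_fold]
  simp only [List.nil_append]
  exact List.map_congr_left (fun row hr => row_eq row (hpre row hr))
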